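-- pv_equiv track=rewrite | github.com/sujinee0010/Algorithm_P | BOJ/p3687.py | makeMinNum
-- ===== SOURCE A (Python) =====
-- def makeMinNum(c):
--     dp = [-1 for _ in range(c + 1)]
--     marr = [0, 0, 1, 7, 4, 2, 0, 8]
--
--     for i in range(c + 1):
--         if i < 8:
--             if i == 6:
--                 dp[i] = 6
--             else:
--                 dp[i] = marr[i]
--         else:
--             for j in range(2, 8):
--                 if i - j >= 2:
--                     dp[i] = min(int(str(dp[i - j]) + str(marr[j])), dp[i]) if dp[i] != -1 else int(
--                         str(dp[i - j]) + str(marr[j]))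
--
--     return dp[c]
-- ===== SOURCE B (Python) =====
-- def makeMinNum(c):
--     # Smallest number consuming exactly c matchsticks, by closed form:
--     # it has n = ceil(c/7) digits (a digit costs at most 7 sticks); relative to
--     # the all-8s number (7 sticks each) we must save s = 7*n - c sticks, and the
--     # cheapest way to do that is a fixed short head followed by trailing 8s.
--     small = [0, 0, 1, 7, 4, 2, 6, 8, 10, 18, 22, 20, 28, 68, 88]
--     if c < 15:
--         return small[c]
--     n = (c + 6) // 7
--     s = 7 * n - c
--     head, hlen = [(0, 0), (6, 1), (2, 1), (20, 2), (200, 3), (1, 1), (10, 2)][s]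
--     e = n - hlen  # number of trailing 8s
--     return head * 10 ** e + 8 * ((10 ** e - 1) // 9)
-- ===== Notes on version B (the rewrite author's own statement) =====
-- stated objective: faster
-- what changed: replaces the quadratic big-int DP over all stick counts up to c by a closed form: the answer has n=ceil(c/7) digits and equals a fixed short head (chosen by s=7n-c, table for c<15) followed by trailing 8s
import Mathlib
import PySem

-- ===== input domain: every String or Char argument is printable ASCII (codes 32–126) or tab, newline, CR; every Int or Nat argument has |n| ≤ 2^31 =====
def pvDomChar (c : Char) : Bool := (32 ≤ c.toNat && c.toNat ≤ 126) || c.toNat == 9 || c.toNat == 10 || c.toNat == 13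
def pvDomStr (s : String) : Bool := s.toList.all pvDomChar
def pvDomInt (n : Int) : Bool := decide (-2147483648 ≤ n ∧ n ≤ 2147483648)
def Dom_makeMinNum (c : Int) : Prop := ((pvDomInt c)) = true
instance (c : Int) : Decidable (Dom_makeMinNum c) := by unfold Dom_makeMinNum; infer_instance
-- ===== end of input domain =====

-- B replaces A's quadratic big-int DP by the closed form of the answer (ceil(c/7) digits:
-- a short head determined by 7*ceil(c/7) - c, then trailing 8s); equivalence proved for c ≥ 0.

-- ===== PORT A =====
def pvMarr : List Int := [0, 0, 1, 7, 4, 2, 0, 8]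

-- int(str(x) + str(y)) ported by hand: build both decimal strings, then fold the digit
-- characters (exact for x ≥ 0 and 0 ≤ y, where str() yields pure decimal digits with no
-- sign/space — the only shape reaching this expression: dp[i-j] ≥ 0 and marr[j] a digit).
def pvDigitsVal (cs : List Char) : Int :=
  cs.foldl (fun v ch => 10 * v + ((ch.toNat : Int) - 48)) 0

def pvIntCat (x y : Int) : Int :=
  pvDigitsVal (PySem.Int.toChars x ++ PySem.Int.toChars y)

def pvInner (i : Int) (dp : List Int) (j : Int) : List Int :=
  if i - j ≥ 2 then
    -- dp[i] = min(int(str(dp[i-j]) + str(marr[j])), dp[i]) if dp[i] != -1 else int(...)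
    let cat := pvIntCat (PySem.List.pyGetD dp (i - j) 0) (PySem.List.pyGetD pvMarr j 0)
    dp.set i.toNat (if PySem.List.pyGetD dp i 0 ≠ -1 then min cat (PySem.List.pyGetD dp i 0) else cat)
  else dp

def pvOuter (dp : List Int) (i : Int) : List Int :=
  if i < 8 then
    if i = 6 then dp.set i.toNat 6
    else dp.set i.toNat (PySem.List.pyGetD pvMarr i 0)
  else (PySem.List.pyRange 2 8 1).foldl (pvInner i) dp

def makeMinNum (c : Int) : Int :=
  let dp0 := (PySem.List.pyRange 0 (c + 1) 1).map (fun _ => (-1 : Int))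
  let dp := (PySem.List.pyRange 0 (c + 1) 1).foldl pvOuter dp0
  PySem.List.pyGetD dp c 0   -- dp[c]; the IndexError case (negative c) is excluded by Pre_

-- ===== PORT B =====
def pvSmall : List Int := [0, 0, 1, 7, 4, 2, 6, 8, 10, 18, 22, 20, 28, 68, 88]
def pvHeads : List (Int × Int) := [(0, 0), (6, 1), (2, 1), (20, 2), (200, 3), (1, 1), (10, 2)]

def makeMinNum_alt (c : Int) : Int :=
  if c < 15 then PySem.List.pyGetD pvSmall c 0   -- small[c] (pyGetD matches Python's negative wraparound)
  else
    let n := PySem.Int.floordiv (c + 6) 7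
    let s := 7 * n - c
    let hd := PySem.List.pyGetD pvHeads s (0, 0)
    let e := n - hd.2
    -- 10 ** e ported as 10 ^ e.toNat: exact for e ≥ 0 (here e ≥ 1)
    hd.1 * 10 ^ e.toNat + 8 * PySem.Int.floordiv (10 ^ e.toNat - 1) 9

-- ===== PRECONDITION & SPEC =====
-- A raises IndexError on every negative input (dp is empty and dp[c] is read); excluded.
def Pre_makeMinNum (c : Int) : Prop := 0 ≤ c
instance (c : Int) : Decidable (Pre_makeMinNum c) := by unfold Pre_makeMinNum; infer_instance
def pvWitness_makeMinNum : Int := 17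

def Spec_makeMinNum (c : Int) (out : Int) : Prop := out = makeMinNum_alt c
instance (c : Int) (out : Int) : Decidable (Spec_makeMinNum c out) := by unfold Spec_makeMinNum; infer_instance

-- ===== CLAIM (what is proved, stated in full; the proofs are below) =====
def Claim_equal_makeMinNum : Prop := ∀ (c : Int), Dom_makeMinNum c → Pre_makeMinNum c → Spec_makeMinNum c (makeMinNum c)

-- ===== LEMMAS AND PROOFS =====

-- repunit: pvR m = (10^m - 1) / 9, the number written with m ones
def pvR : Nat → Int
  | 0 => 0
  | m + 1 => 10 * pvR m + 1

-- closed form "level" function: head digits of saving class s, then (μ - len) trailing 8s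
def pvHeadN : Nat → Int × Nat
  | 0 => (0, 0) | 1 => (6, 1) | 2 => (2, 1) | 3 => (20, 2) | 4 => (200, 3) | 5 => (1, 1) | _ => (10, 2)

def pvG (s μ : Nat) : Int := (pvHeadN s).1 * 10 ^ (μ - (pvHeadN s).2) + 8 * pvR (μ - (pvHeadN s).2)

-- the value A's dp table holds at index k (the answer for k matchsticks)
def pvF (k : Nat) : Int :=
  if k < 15 then pvSmall.getD k 0 else pvG (7 * ((k + 6) / 7) - k) ((k + 6) / 7)

-- linear coefficients of pvG s μ in pvR (μ - 3)
def pvAlpha : Nat → Int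
  | 0 => 8000 | 1 => 6200 | 2 => 2600 | 3 => 1880 | 4 => 1808 | 5 => 1700 | _ => 980
def pvBeta : Nat → Int
  | 0 => 888 | 1 => 688 | 2 => 288 | 3 => 208 | 4 => 200 | 5 => 188 | _ => 108

theorem pvR_succ (m : Nat) : pvR (m + 1) = 10 * pvR m + 1 := rfl

theorem pvR_nonneg (m : Nat) : 0 ≤ pvR m := by
  induction m with
  | zero => simp [pvR]
  | succ m ih => simp only [pvR]; omega

theorem pvR_one_le (m : Nat) (h : 1 ≤ m) : 1 ≤ pvR m := by
  obtain ⟨m, rfl⟩ : ∃ k, m = k + 1 := ⟨m - 1, by omega⟩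
  have := pvR_nonneg m; simp only [pvR]; omega

theorem ten_pow_eq (m : Nat) : (10 : Int) ^ m = 9 * pvR m + 1 := by
  induction m with
  | zero => simp [pvR]
  | succ m ih => rw [pow_succ, ih]; simp only [pvR]; ring

theorem pvR_add (a b : Nat) : pvR (a + b) = pvR a * 10 ^ b + pvR b := by
  induction b with
  | zero => simp [pvR]
  | succ b ih => rw [← Nat.add_assoc]; simp only [pvR, pow_succ, ih]; ring

theorem pvG_expand (P : Int) (L μ : Nat) (hL : L ≤ 3) (hμ : 3 ≤ μ) :
    P * 10 ^ (μ - L) + 8 * pvR (μ - L)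
      = (9 * P * 10 ^ (3 - L) + 8 * 10 ^ (3 - L)) * pvR (μ - 3) + (P * 10 ^ (3 - L) + 8 * pvR (3 - L)) := by
  have h : μ - L = (μ - 3) + (3 - L) := by omega
  rw [h, pvR_add, pow_add, ten_pow_eq (μ - 3)]; ring

theorem pvG_lin (s μ : Nat) (hs : s ≤ 6) (hμ : 3 ≤ μ) :
    pvG s μ = pvAlpha s * pvR (μ - 3) + pvBeta s := by
  interval_cases s <;>
    (simp only [pvG, pvHeadN]; rw [pvG_expand _ _ _ (by norm_num) hμ]; norm_num [pvAlpha, pvBeta, pvR])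

theorem pvF_eq_pvG (k s n : Nat) (hk : 15 ≤ k) (hs : s ≤ 6) (hsn : k + s = 7 * n) :
    pvF k = pvG s n := by
  unfold pvF
  rw [if_neg (by omega)]
  have h1 : (k + 6) / 7 = n := by omega
  rw [h1]
  congr 1
  omega

theorem pvHeadN_fst_nonneg (s : Nat) : 0 ≤ (pvHeadN s).1 := by
  rcases s with _|_|_|_|_|_|s <;> simp [pvHeadN]

theorem pvF_nonneg (k : Nat) : 0 ≤ pvF k := by
  unfold pvF
  split
  · rename_i h; interval_cases k <;> decide
  · have h1 := pvHeadN_fst_nonneg (7 * ((k + 6) / 7) - k)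
    have h2 := pvR_nonneg ((k + 6) / 7 - (pvHeadN (7 * ((k + 6) / 7) - k)).2)
    unfold pvG
    positivity

-- the inner loop's min chain equals the closed form (the heart of the equivalence)
theorem pvAlphaBeta : pvAlpha 0 = 8000 ∧ pvAlpha 1 = 6200 ∧ pvAlpha 2 = 2600 ∧ pvAlpha 3 = 1880 ∧
    pvAlpha 4 = 1808 ∧ pvAlpha 5 = 1700 ∧ pvAlpha 6 = 980 ∧ pvBeta 0 = 888 ∧ pvBeta 1 = 688 ∧
    pvBeta 2 = 288 ∧ pvBeta 3 = 208 ∧ pvBeta 4 = 200 ∧ pvBeta 5 = 188 ∧ pvBeta 6 = 108 :=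
  ⟨rfl, rfl, rfl, rfl, rfl, rfl, rfl, rfl, rfl, rfl, rfl, rfl, rfl, rfl⟩

set_option maxHeartbeats 1000000 in
theorem pvF_min (k : Nat) (hk : 9 ≤ k) :
    min (pvF (k - 7) * 10 + 8) (min (pvF (k - 6) * 10 + 0) (min (pvF (k - 5) * 10 + 2)
      (min (pvF (k - 4) * 10 + 4) (min (pvF (k - 3) * 10 + 7) (pvF (k - 2) * 10 + 1))))) = pvF k := by
  rcases Nat.lt_or_ge k 29 with h28 | h29
  · have h28b : k ≤ 28 := by omega
    interval_cases k <;> decide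
  · obtain ⟨s, n, hs6, hn5, hk7⟩ : ∃ s n, s ≤ 6 ∧ 5 ≤ n ∧ k + s = 7 * n :=
      ⟨7 * ((k + 6) / 7) - k, (k + 6) / 7, by omega, by omega, by omega⟩
    rw [pvF_eq_pvG k s n (by omega) hs6 hk7]
    have e1 : n - 1 - 3 = n - 4 := by omega
    have e2 : n - 3 = (n - 4) + 1 := by omega
    have hr : 1 ≤ pvR (n - 4) := pvR_one_le _ (by omega)
    interval_cases s
    · rw [pvF_eq_pvG (k - 7) 0 (n - 1) (by omega) (by norm_num) (by omega), pvF_eq_pvG (k - 6) 6 n (by omega) (by norm_num) (by omega), pvF_eq_pvG (k - 5) 5 n (by omega) (by norm_num) (by omega), pvF_eq_pvG (k - 4) 4 n (by omega) (by norm_num) (by omega), pvF_eq_pvG (k - 3) 3 n (by omega) (by norm_num) (by omega), pvF_eq_pvG (k - 2) 2 n (by omega) (by norm_num) (by omega),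
          pvG_lin 0 (n - 1) (by norm_num) (by omega), pvG_lin 6 n (by norm_num) (by omega), pvG_lin 5 n (by norm_num) (by omega), pvG_lin 4 n (by norm_num) (by omega), pvG_lin 3 n (by norm_num) (by omega), pvG_lin 2 n (by norm_num) (by omega), pvG_lin 0 n (by norm_num) (by omega)]
      rw [e1, e2]
      simp only [pvR_succ, pvAlphaBeta]
      simp only [min_def]
      split_ifs <;> omega
    · rw [pvF_eq_pvG (k - 7) 1 (n - 1) (by omega) (by norm_num) (by omega), pvF_eq_pvG (k - 6) 0 (n - 1) (by omega) (by norm_num) (by omega), pvF_eq_pvG (k - 5) 6 n (by omega) (by norm_num) (by omega), pvF_eq_pvG (k - 4) 5 n (by omega) (by norm_num) (by omega), pvF_eq_pvG (k - 3) 4 n (by omega) (by norm_num) (by omega), pvF_eq_pvG (k - 2) 3 n (by omega) (by norm_num) (by omega),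
          pvG_lin 1 (n - 1) (by norm_num) (by omega), pvG_lin 0 (n - 1) (by norm_num) (by omega), pvG_lin 6 n (by norm_num) (by omega), pvG_lin 5 n (by norm_num) (by omega), pvG_lin 4 n (by norm_num) (by omega), pvG_lin 3 n (by norm_num) (by omega), pvG_lin 1 n (by norm_num) (by omega)]
      rw [e1, e2]
      simp only [pvR_succ, pvAlphaBeta]
      simp only [min_def]
      split_ifs <;> omega
    · rw [pvF_eq_pvG (k - 7) 2 (n - 1) (by omega) (by norm_num) (by omega), pvF_eq_pvG (k - 6) 1 (n - 1) (by omega) (by norm_num) (by omega), pvF_eq_pvG (k - 5) 0 (n - 1) (by omega) (by norm_num) (by omega), pvF_eq_pvG (k - 4) 6 n (by omega) (by norm_num) (by omega), pvF_eq_pvG (k - 3) 5 n (by omega) (by norm_num) (by omega), pvF_eq_pvG (k - 2) 4 n (by omega) (by norm_num) (by omega),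
          pvG_lin 2 (n - 1) (by norm_num) (by omega), pvG_lin 1 (n - 1) (by norm_num) (by omega), pvG_lin 0 (n - 1) (by norm_num) (by omega), pvG_lin 6 n (by norm_num) (by omega), pvG_lin 5 n (by norm_num) (by omega), pvG_lin 4 n (by norm_num) (by omega), pvG_lin 2 n (by norm_num) (by omega)]
      rw [e1, e2]
      simp only [pvR_succ, pvAlphaBeta]
      simp only [min_def]
      split_ifs <;> omega
    · rw [pvF_eq_pvG (k - 7) 3 (n - 1) (by omega) (by norm_num) (by omega), pvF_eq_pvG (k - 6) 2 (n - 1) (by omega) (by norm_num) (by omega), pvF_eq_pvG (k - 5) 1 (n - 1) (by omega) (by norm_num) (by omega), pvF_eq_pvG (k - 4) 0 (n - 1) (by omega) (by norm_num) (by omega), pvF_eq_pvG (k - 3) 6 n (by omega) (by norm_num) (by omega), pvF_eq_pvG (k - 2) 5 n (by omega) (by norm_num) (by omega),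
          pvG_lin 3 (n - 1) (by norm_num) (by omega), pvG_lin 2 (n - 1) (by norm_num) (by omega), pvG_lin 1 (n - 1) (by norm_num) (by omega), pvG_lin 0 (n - 1) (by norm_num) (by omega), pvG_lin 6 n (by norm_num) (by omega), pvG_lin 5 n (by norm_num) (by omega), pvG_lin 3 n (by norm_num) (by omega)]
      rw [e1, e2]
      simp only [pvR_succ, pvAlphaBeta]
      simp only [min_def]
      split_ifs <;> omega
    · rw [pvF_eq_pvG (k - 7) 4 (n - 1) (by omega) (by norm_num) (by omega), pvF_eq_pvG (k - 6) 3 (n - 1) (by omega) (by norm_num) (by omega), pvF_eq_pvG (k - 5) 2 (n - 1) (by omega) (by norm_num) (by omega), pvF_eq_pvG (k - 4) 1 (n - 1) (by omega) (by norm_num) (by omega), pvF_eq_pvG (k - 3) 0 (n - 1) (by omega) (by norm_num) (by omega), pvF_eq_pvG (k - 2) 6 n (by omega) (by norm_num) (by omega),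
          pvG_lin 4 (n - 1) (by norm_num) (by omega), pvG_lin 3 (n - 1) (by norm_num) (by omega), pvG_lin 2 (n - 1) (by norm_num) (by omega), pvG_lin 1 (n - 1) (by norm_num) (by omega), pvG_lin 0 (n - 1) (by norm_num) (by omega), pvG_lin 6 n (by norm_num) (by omega), pvG_lin 4 n (by norm_num) (by omega)]
      rw [e1, e2]
      simp only [pvR_succ, pvAlphaBeta]
      simp only [min_def]
      split_ifs <;> omega
    · rw [pvF_eq_pvG (k - 7) 5 (n - 1) (by omega) (by norm_num) (by omega), pvF_eq_pvG (k - 6) 4 (n - 1) (by omega) (by norm_num) (by omega), pvF_eq_pvG (k - 5) 3 (n - 1) (by omega) (by norm_num) (by omega), pvF_eq_pvG (k - 4) 2 (n - 1) (by omega) (by norm_num) (by omega), pvF_eq_pvG (k - 3) 1 (n - 1) (by omega) (by norm_num) (by omega), pvF_eq_pvG (k - 2) 0 (n - 1) (by omega) (by norm_num) (by omega),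
          pvG_lin 5 (n - 1) (by norm_num) (by omega), pvG_lin 4 (n - 1) (by norm_num) (by omega), pvG_lin 3 (n - 1) (by norm_num) (by omega), pvG_lin 2 (n - 1) (by norm_num) (by omega), pvG_lin 1 (n - 1) (by norm_num) (by omega), pvG_lin 0 (n - 1) (by norm_num) (by omega), pvG_lin 5 n (by norm_num) (by omega)]
      rw [e1, e2]
      simp only [pvR_succ, pvAlphaBeta]
      simp only [min_def]
      split_ifs <;> omega
    · rw [pvF_eq_pvG (k - 7) 6 (n - 1) (by omega) (by norm_num) (by omega), pvF_eq_pvG (k - 6) 5 (n - 1) (by omega) (by norm_num) (by omega), pvF_eq_pvG (k - 5) 4 (n - 1) (by omega) (by norm_num) (by omega), pvF_eq_pvG (k - 4) 3 (n - 1) (by omega) (by norm_num) (by omega), pvF_eq_pvG (k - 3) 2 (n - 1) (by omega) (by norm_num) (by omega), pvF_eq_pvG (k - 2) 1 (n - 1) (by omega) (by norm_num) (by omega),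
          pvG_lin 6 (n - 1) (by norm_num) (by omega), pvG_lin 5 (n - 1) (by norm_num) (by omega), pvG_lin 4 (n - 1) (by norm_num) (by omega), pvG_lin 3 (n - 1) (by norm_num) (by omega), pvG_lin 2 (n - 1) (by norm_num) (by omega), pvG_lin 1 (n - 1) (by norm_num) (by omega), pvG_lin 6 n (by norm_num) (by omega)]
      rw [e1, e2]
      simp only [pvR_succ, pvAlphaBeta]
      simp only [min_def]
      split_ifs <;> omega

-- int(str x ++ str y) arithmetic
theorem digitChar_toNat (m : Nat) (h : m < 10) : (Nat.digitChar m).toNat = 48 + m := by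
  interval_cases m <;> rfl

theorem digitsVal_toDigits (n : Nat) : ∀ v : Int,
    List.foldl (fun v ch => 10 * v + ((ch.toNat : Int) - 48)) v (Nat.toDigits 10 n)
      = v * 10 ^ (Nat.toDigits 10 n).length + n := by
  induction n using Nat.strong_induction_on with
  | _ n ih =>
    intro v
    rcases Nat.lt_or_ge n 10 with h | h
    · rw [Nat.toDigits_of_lt_base h]
      simp only [List.foldl_cons, List.foldl_nil, List.length_cons, List.length_nil,
        digitChar_toNat n h]
      push_cast; ring
    · rw [Nat.toDigits_of_base_le (by norm_num) h, List.foldl_append, List.length_append]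
      simp only [List.foldl_cons, List.foldl_nil, List.length_cons, List.length_nil]
      rw [ih (n / 10) (by omega), digitChar_toNat (n % 10) (by omega)]
      have hn : (n : Int) = 10 * ((n / 10 : Nat) : Int) + ((n % 10 : Nat) : Int) := by
        push_cast; omega
      rw [hn, pow_add]
      push_cast; ring

theorem pvIntCat_eq (x y : Int) (hx : 0 ≤ x) (hy0 : 0 ≤ y) (hy9 : y ≤ 9) :
    pvIntCat x y = x * 10 + y := by
  unfold pvIntCat pvDigitsVal
  have htx : PySem.Int.toChars x = Nat.toDigits 10 x.toNat := by
    simp [PySem.Int.toChars, not_lt.mpr hx]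
  have hty : PySem.Int.toChars y = [Nat.digitChar y.toNat] := by
    simp [PySem.Int.toChars, not_lt.mpr hy0]
    exact Nat.toDigits_of_lt_base (by omega)
  rw [htx, hty, List.foldl_append, digitsVal_toDigits x.toNat 0]
  simp only [List.foldl_cons, List.foldl_nil]
  rw [digitChar_toNat y.toNat (by omega)]
  have h1 : (x.toNat : Int) = x := Int.toNat_of_nonneg hx
  have h2 : (y.toNat : Int) = y := Int.toNat_of_nonneg hy0
  push_cast [h1, h2]
  ring

-- the dp list after the outer loop has processed indices < i
def pvL (N i : Nat) : List Int := (List.range N).map (fun k => if k < i then pvF k else -1)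

theorem pvL_length (N i : Nat) : (pvL N i).length = N := by simp [pvL]

theorem pvL_getD (N i k : Nat) (hk : k < N) :
    (pvL N i).getD k 0 = if k < i then pvF k else -1 := by
  simp [pvL, List.getD_eq_getElem?_getD, hk]

theorem pvL_set (N i : Nat) (hi : i < N) : (pvL N i).set i (pvF i) = pvL N (i + 1) := by
  apply List.ext_getElem (by simp [pvL])
  intro k h1 h2
  have hkN : k < N := by simpa [pvL] using h2
  rw [List.getElem_set]
  by_cases hk : k = i
  · subst hk; simp [pvL]
  · rw [if_neg (fun h : i = k => hk h.symm)]
    simp only [pvL, List.getElem_map, List.getElem_range]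
    by_cases hlt : k < i
    · rw [if_pos hlt, if_pos (by omega)]
    · rw [if_neg hlt, if_neg (by omega)]

theorem pvL_set_self (N i : Nat) : (pvL N i).set i (-1) = pvL N i := by
  apply List.ext_getElem (by simp)
  intro k h1 h2
  rw [List.getElem_set]
  by_cases hk : k = i
  · subst hk; simp [pvL] at h2 ⊢
  · rw [if_neg (fun h : i = k => hk h.symm)]

theorem pvInner_eval (N i j : Nat) (hiN : i < N) (h2 : 2 ≤ j) (h7 : j < 8)
    (hij : j + 2 ≤ i) (a : Int) :
    pvInner (i : Int) ((pvL N i).set i a) (j : Int)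
      = (pvL N i).set i (if a ≠ -1 then min (pvF (i - j) * 10 + PySem.List.pyGetD pvMarr (j : Int) 0) a
          else (pvF (i - j) * 10 + PySem.List.pyGetD pvMarr (j : Int) 0)) := by
  have hmarr : 0 ≤ PySem.List.pyGetD pvMarr (j : Int) 0 ∧ PySem.List.pyGetD pvMarr (j : Int) 0 ≤ 9 := by
    interval_cases j <;> exact ⟨by decide, by decide⟩
  unfold pvInner
  rw [if_pos (by omega)]
  have hsub : (i : Int) - (j : Int) = ((i - j : Nat) : Int) := by push_cast [Nat.cast_sub (by omega : j ≤ i)]; ring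
  have hread1 : PySem.List.pyGetD ((pvL N i).set i a) ((i : Int) - (j : Int)) 0 = pvF (i - j) := by
    rw [hsub, PySem.List.pyGetD_natCast]
    rw [List.getD_eq_getElem?_getD, List.getElem?_set_ne (by omega), ← List.getD_eq_getElem?_getD]
    rw [pvL_getD N i (i - j) (by omega), if_pos (by omega)]
  have hread2 : PySem.List.pyGetD ((pvL N i).set i a) (i : Int) 0 = a := by
    rw [PySem.List.pyGetD_natCast]
    rw [List.getD_eq_getElem?_getD, List.getElem?_set_eq_of_lt _ (by rw [pvL_length]; omega)]
    rfl
  rw [hread1, hread2]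
  rw [pvIntCat_eq _ _ (pvF_nonneg _) hmarr.1 hmarr.2]
  rw [Int.toNat_natCast, List.set_set]

theorem pvInner_skip (dp : List Int) : pvInner ((8:Nat):Int) dp ((7:Nat):Int) = dp := by
  unfold pvInner
  rw [if_neg (by norm_num)]

theorem pvOuter_step (N i : Nat) (hi : i < N) : pvOuter (pvL N i) (i : Int) = pvL N (i + 1) := by
  have m2 : PySem.List.pyGetD pvMarr ((2:Nat):Int) 0 = 1 := by decide
  have m3 : PySem.List.pyGetD pvMarr ((3:Nat):Int) 0 = 7 := by decide
  have m4 : PySem.List.pyGetD pvMarr ((4:Nat):Int) 0 = 4 := by decide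
  have m5 : PySem.List.pyGetD pvMarr ((5:Nat):Int) 0 = 2 := by decide
  have m6 : PySem.List.pyGetD pvMarr ((6:Nat):Int) 0 = 0 := by decide
  have m7 : PySem.List.pyGetD pvMarr ((7:Nat):Int) 0 = 8 := by decide
  unfold pvOuter
  by_cases h8 : i < 8
  · rw [if_pos (by exact_mod_cast h8)]
    by_cases h6 : i = 6
    · subst h6
      rw [if_pos (by norm_num), Int.toNat_natCast]
      have : (6:Int) = pvF 6 := by decide
      rw [this, pvL_set N 6 hi]
    · rw [if_neg (by exact_mod_cast h6)]
      have hv : PySem.List.pyGetD pvMarr (i : Int) 0 = pvF i := by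
        interval_cases i <;> first | decide | (exact absurd rfl h6)
      rw [hv, Int.toNat_natCast, pvL_set N i hi]
  · rw [if_neg (by exact_mod_cast h8)]
    have hrange : PySem.List.pyRange 2 8 1
        = [((2:Nat):Int), ((3:Nat):Int), ((4:Nat):Int), ((5:Nat):Int), ((6:Nat):Int), ((7:Nat):Int)] := by decide
    rw [hrange]
    simp only [List.foldl_cons, List.foldl_nil]
    by_cases hi9 : 9 ≤ i
    · -- i ≥ 9: all six inner iterations run
      rw [← pvL_set_self N i]
      rw [pvInner_eval N i 2 hi (by omega) (by omega) (by omega) (-1), if_neg (by simp), m2]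
      have a2 : (0:Int) ≤ pvF (i - 2) * 10 + 1 := by have := pvF_nonneg (i - 2); omega
      rw [pvInner_eval N i 3 hi (by omega) (by omega) (by omega) (pvF (i - 2) * 10 + 1), if_pos (by omega), m3]
      have a3 : (0:Int) ≤ min (pvF (i - 3) * 10 + 7) (pvF (i - 2) * 10 + 1) := le_min (by have := pvF_nonneg (i - 3); omega) a2
      rw [pvInner_eval N i 4 hi (by omega) (by omega) (by omega) (min (pvF (i - 3) * 10 + 7) (pvF (i - 2) * 10 + 1)), if_pos (by omega), m4]
      have a4 : (0:Int) ≤ min (pvF (i - 4) * 10 + 4) (min (pvF (i - 3) * 10 + 7) (pvF (i - 2) * 10 + 1)) := le_min (by have := pvF_nonneg (i - 4); omega) a3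
      rw [pvInner_eval N i 5 hi (by omega) (by omega) (by omega) (min (pvF (i - 4) * 10 + 4) (min (pvF (i - 3) * 10 + 7) (pvF (i - 2) * 10 + 1))), if_pos (by omega), m5]
      have a5 : (0:Int) ≤ min (pvF (i - 5) * 10 + 2) (min (pvF (i - 4) * 10 + 4) (min (pvF (i - 3) * 10 + 7) (pvF (i - 2) * 10 + 1))) := le_min (by have := pvF_nonneg (i - 5); omega) a4
      rw [pvInner_eval N i 6 hi (by omega) (by omega) (by omega) (min (pvF (i - 5) * 10 + 2) (min (pvF (i - 4) * 10 + 4) (min (pvF (i - 3) * 10 + 7) (pvF (i - 2) * 10 + 1)))), if_pos (by omega), m6]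
      have a6 : (0:Int) ≤ min (pvF (i - 6) * 10 + 0) (min (pvF (i - 5) * 10 + 2) (min (pvF (i - 4) * 10 + 4) (min (pvF (i - 3) * 10 + 7) (pvF (i - 2) * 10 + 1)))) := le_min (by have := pvF_nonneg (i - 6); omega) a5
      rw [pvInner_eval N i 7 hi (by omega) (by omega) (by omega) (min (pvF (i - 6) * 10 + 0) (min (pvF (i - 5) * 10 + 2) (min (pvF (i - 4) * 10 + 4) (min (pvF (i - 3) * 10 + 7) (pvF (i - 2) * 10 + 1))))), if_pos (by omega), m7]
      have a7 : (0:Int) ≤ min (pvF (i - 7) * 10 + 8) (min (pvF (i - 6) * 10 + 0) (min (pvF (i - 5) * 10 + 2) (min (pvF (i - 4) * 10 + 4) (min (pvF (i - 3) * 10 + 7) (pvF (i - 2) * 10 + 1))))) := le_min (by have := pvF_nonneg (i - 7); omega) a6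
      rw [pvF_min i hi9, pvL_set N i hi]
    -- i = 8: the j = 7 iteration is skipped (i - j < 2)
    · have h8e : i = 8 := by omega
      subst h8e
      rw [← pvL_set_self N 8]
      rw [pvInner_eval N 8 2 hi (by omega) (by omega) (by omega) (-1), if_neg (by simp), m2]
      have a2 : (0:Int) ≤ pvF (8 - 2) * 10 + 1 := by have := pvF_nonneg (8 - 2); omega
      rw [pvInner_eval N 8 3 hi (by omega) (by omega) (by omega) (pvF (8 - 2) * 10 + 1), if_pos (by omega), m3]
      have a3 : (0:Int) ≤ min (pvF (8 - 3) * 10 + 7) (pvF (8 - 2) * 10 + 1) := le_min (by have := pvF_nonneg (8 - 3); omega) a2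
      rw [pvInner_eval N 8 4 hi (by omega) (by omega) (by omega) (min (pvF (8 - 3) * 10 + 7) (pvF (8 - 2) * 10 + 1)), if_pos (by omega), m4]
      have a4 : (0:Int) ≤ min (pvF (8 - 4) * 10 + 4) (min (pvF (8 - 3) * 10 + 7) (pvF (8 - 2) * 10 + 1)) := le_min (by have := pvF_nonneg (8 - 4); omega) a3
      rw [pvInner_eval N 8 5 hi (by omega) (by omega) (by omega) (min (pvF (8 - 4) * 10 + 4) (min (pvF (8 - 3) * 10 + 7) (pvF (8 - 2) * 10 + 1))), if_pos (by omega), m5]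
      have a5 : (0:Int) ≤ min (pvF (8 - 5) * 10 + 2) (min (pvF (8 - 4) * 10 + 4) (min (pvF (8 - 3) * 10 + 7) (pvF (8 - 2) * 10 + 1))) := le_min (by have := pvF_nonneg (8 - 5); omega) a4
      rw [pvInner_eval N 8 6 hi (by omega) (by omega) (by omega) (min (pvF (8 - 5) * 10 + 2) (min (pvF (8 - 4) * 10 + 4) (min (pvF (8 - 3) * 10 + 7) (pvF (8 - 2) * 10 + 1)))), if_pos (by omega), m6]
      have a6 : (0:Int) ≤ min (pvF (8 - 6) * 10 + 0) (min (pvF (8 - 5) * 10 + 2) (min (pvF (8 - 4) * 10 + 4) (min (pvF (8 - 3) * 10 + 7) (pvF (8 - 2) * 10 + 1)))) := le_min (by have := pvF_nonneg (8 - 6); omega) a5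
      rw [pvInner_skip]
      have hval : min (pvF (8 - 6) * 10 + 0) (min (pvF (8 - 5) * 10 + 2) (min (pvF (8 - 4) * 10 + 4) (min (pvF (8 - 3) * 10 + 7) (pvF (8 - 2) * 10 + 1)))) = pvF 8 := by decide
      rw [hval, pvL_set N 8 hi]

theorem pvLoop (N : Nat) : ∀ i, i ≤ N →
    (List.range i).foldl (fun dp (k : Nat) => pvOuter dp (k : Int)) (pvL N 0) = pvL N i := by
  intro i
  induction i with
  | zero => intro _; rfl
  | succ i ih =>
      intro h
      rw [List.range_succ, List.foldl_append, ih (by omega)]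
      simpa using pvOuter_step N i (by omega)

theorem makeMinNum_eq_pvF (c : Int) (hc : 0 ≤ c) : makeMinNum c = pvF c.toNat := by
  obtain ⟨k, rfl⟩ : ∃ k : Nat, c = (k : Int) := ⟨c.toNat, (Int.toNat_of_nonneg hc).symm⟩
  rw [Int.toNat_natCast]
  simp only [makeMinNum]
  have hr : PySem.List.pyRange 0 ((k : Int) + 1) 1 = (List.range (k + 1)).map (fun j : Nat => (j : Int)) := by
    rw [PySem.List.pyRange_one]
    have h2 : ((k : Int) + 1 - 0).toNat = k + 1 := by omega
    rw [h2]; simp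
  rw [hr, List.foldl_map]
  have h0 : ((List.range (k + 1)).map (fun j : Nat => (j : Int))).map (fun _ => (-1 : Int))
      = pvL (k + 1) 0 := by simp [pvL, Function.comp_def]
  rw [h0, pvLoop (k + 1) (k + 1) (le_refl _)]
  rw [PySem.List.pyGetD_natCast, pvL_getD (k + 1) (k + 1) k (by omega), if_pos (by omega)]

theorem pvR_div (m : Nat) : PySem.Int.floordiv (10 ^ m - 1) 9 = pvR m := by
  have h : (10 : Int) ^ m - 1 = 9 * pvR m := by rw [ten_pow_eq]; ring
  rw [h, PySem.Int.floordiv_eq_ediv_of_pos (by norm_num), Int.mul_ediv_cancel_left _ (by norm_num)]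

theorem alt_branch (n : Nat) (P L : Int) (M : Nat) (hM : ((n : Int) - L).toNat = M) :
    P * 10 ^ (((n : Int) - L).toNat) + 8 * PySem.Int.floordiv (10 ^ (((n : Int) - L).toNat) - 1) 9
      = P * 10 ^ M + 8 * pvR M := by
  rw [hM, pvR_div]

theorem alt_eq_pvF (c : Int) (hc : 0 ≤ c) : makeMinNum_alt c = pvF c.toNat := by
  obtain ⟨k, rfl⟩ : ∃ k : Nat, c = (k : Int) := ⟨c.toNat, (Int.toNat_of_nonneg hc).symm⟩
  rw [Int.toNat_natCast]
  rcases Nat.lt_or_ge k 15 with h15 | h15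
  · interval_cases k <;> decide
  · simp only [makeMinNum_alt]
    rw [if_neg (by omega)]
    obtain ⟨s, n, hs6, hn3, hk7⟩ : ∃ s n, s ≤ 6 ∧ 3 ≤ n ∧ k + s = 7 * n :=
      ⟨7 * ((k + 6) / 7) - k, (k + 6) / 7, by omega, by omega, by omega⟩
    rw [pvF_eq_pvG k s n h15 hs6 hk7]
    have hfd : PySem.Int.floordiv ((k : Int) + 6) 7 = (n : Int) := by
      rw [PySem.Int.floordiv_eq_ediv_of_pos (by norm_num)]
      omega
    rw [hfd]
    have hs : 7 * (n : Int) - (k : Int) = ((s : Nat) : Int) := by omega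
    rw [hs]
    interval_cases s
    · rw [show PySem.List.pyGetD pvHeads ((0:Nat):Int) (0, 0) = ((0:Int), (0:Int)) from by decide]
      rw [alt_branch n 0 0 (n - 0) (by omega)]
      norm_num [pvG, pvHeadN]
    · rw [show PySem.List.pyGetD pvHeads ((1:Nat):Int) (0, 0) = ((6:Int), (1:Int)) from by decide]
      rw [alt_branch n 6 1 (n - 1) (by omega)]
      norm_num [pvG, pvHeadN]
    · rw [show PySem.List.pyGetD pvHeads ((2:Nat):Int) (0, 0) = ((2:Int), (1:Int)) from by decide]
      rw [alt_branch n 2 1 (n - 1) (by omega)]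
      norm_num [pvG, pvHeadN]
    · rw [show PySem.List.pyGetD pvHeads ((3:Nat):Int) (0, 0) = ((20:Int), (2:Int)) from by decide]
      rw [alt_branch n 20 2 (n - 2) (by omega)]
      norm_num [pvG, pvHeadN]
    · rw [show PySem.List.pyGetD pvHeads ((4:Nat):Int) (0, 0) = ((200:Int), (3:Int)) from by decide]
      rw [alt_branch n 200 3 (n - 3) (by omega)]
      norm_num [pvG, pvHeadN]
    · rw [show PySem.List.pyGetD pvHeads ((5:Nat):Int) (0, 0) = ((1:Int), (1:Int)) from by decide]
      rw [alt_branch n 1 1 (n - 1) (by omega)]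
      norm_num [pvG, pvHeadN]
    · rw [show PySem.List.pyGetD pvHeads ((6:Nat):Int) (0, 0) = ((10:Int), (2:Int)) from by decide]
      rw [alt_branch n 10 2 (n - 2) (by omega)]
      norm_num [pvG, pvHeadN]

-- ===== VERDICT (by name: the statement is the Claim_ definition above) =====
theorem makeMinNum_spec : Claim_equal_makeMinNum := by
  intro c _ hpre
  unfold Spec_makeMinNum
  rw [makeMinNum_eq_pvF c hpre, alt_eq_pvF c hpre]
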